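-- pv_equiv track=rewrite | github.com/RAVANv2/Code_blocks | DP/ladders.py | step_d_t
-- ===== SOURCE A (Python) =====
-- def step_d_t(n,k): #Time Complexity O(n*k)
-- 	dp = [0]*(n+1)
-- 	dp[0] = 1
-- 	for i in range(1,n+1):
-- 		ans = 0
-- 		for j in range(1,k+1):
-- 			if i-j>=0:
-- 				ans += dp[i-j]
-- 		dp[i] = ans
-- 	return dp[n]
-- ===== SOURCE B (Python) =====
-- def step_d_t(n, k):
--     # Sliding-window running sum of the last k dp values: O(n) instead of O(n*k).
--     dp = [1]
--     window = 0
--     for i in range(1, n + 1):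
--         if k > 0:
--             window += dp[i - 1]
--             if i - k - 1 >= 0:
--                 window -= dp[i - k - 1]
--         dp.append(window)
--     return dp[n]
-- ===== Notes on version B (the rewrite author's own statement) =====
-- stated objective: faster
-- what changed: Replaces the inner O(k) rescan of the last k dp values by a sliding-window running sum maintained in O(1) per step (dp grown by append instead of preallocate+index-assign).
import Mathlib
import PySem

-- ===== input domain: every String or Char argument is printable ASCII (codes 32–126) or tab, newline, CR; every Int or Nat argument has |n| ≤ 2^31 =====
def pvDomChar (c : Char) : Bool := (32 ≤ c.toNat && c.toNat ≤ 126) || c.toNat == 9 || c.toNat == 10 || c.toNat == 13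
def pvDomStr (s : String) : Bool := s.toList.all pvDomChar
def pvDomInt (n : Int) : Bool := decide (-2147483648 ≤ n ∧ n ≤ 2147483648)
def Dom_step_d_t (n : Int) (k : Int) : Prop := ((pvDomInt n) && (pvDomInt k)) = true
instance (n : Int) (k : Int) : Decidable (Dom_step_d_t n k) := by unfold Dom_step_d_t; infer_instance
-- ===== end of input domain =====

-- B replaces A's inner O(k) rescan by a sliding-window running sum kept in O(1) per step.

-- ===== PORT A =====
-- Python lists are ported as Array Int (O(1) index/assign, as in Python); the final dp[n]
-- read uses PySem.List.pyGetD on toList for exact Python index semantics.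
-- inner loop of A: `ans = 0; for j in range(1,k+1): if i-j>=0: ans += dp[i-j]`
-- (the guard gives 0 <= i-j < i <= dp.size, so plain Nat indexing with default is exact)
def innerAA (k i : Int) (dp : Array Int) : Int :=
  (PySem.List.pyRange 1 (k+1) 1).foldl
    (fun ans j => if i - j ≥ 0 then ans + dp.getD (i-j).toNat 0 else ans) 0

def step_d_t (n : Int) (k : Int) : Int :=
  -- dp = [0]*(n+1); dp[0] = 1  (IndexError when n < 0: excluded by Pre_)
  let dp := (Array.replicate (n+1).toNat 0).setIfInBounds 0 1
  -- for i in range(1,n+1): dp[i] = ans   (1 <= i <= n < len(dp): in range)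
  let dp := (PySem.List.pyRange 1 (n+1) 1).foldl
    (fun dp i => dp.setIfInBounds i.toNat (innerAA k i dp)) dp
  PySem.List.pyGetD dp.toList n 0

-- ===== PORT B =====
def step_d_t_alt (n : Int) (k : Int) : Int :=
  -- dp = [1]; window = 0; for i in range(1,n+1): … dp.append(window)
  -- (reads dp[i-1] and dp[i-k-1] happen only under guards putting them in 0..len-1)
  let st := (PySem.List.pyRange 1 (n+1) 1).foldl
    (fun (st : Array Int × Int) i =>
      let w :=
        if k > 0 then
          let w := st.2 + st.1.getD (i-1).toNat 0
          if i - k - 1 ≥ 0 then w - st.1.getD (i-k-1).toNat 0 else w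
        else st.2
      (st.1.push w, w)) (#[1], 0)
  PySem.List.pyGetD st.1.toList n 0

-- ===== PRECONDITION & SPEC =====
-- A raises IndexError (dp[0] on an empty list) when n < 0; Pre_ excludes exactly those inputs.
def Pre_step_d_t (n : Int) (k : Int) : Prop := 0 ≤ n
instance (n : Int) (k : Int) : Decidable (Pre_step_d_t n k) := by unfold Pre_step_d_t; infer_instance
def pvWitness_step_d_t : Int × Int := (5, 3)

def Spec_step_d_t (n : Int) (k : Int) (out : Int) : Prop := out = step_d_t_alt n k
instance (n : Int) (k : Int) (out : Int) : Decidable (Spec_step_d_t n k out) := by unfold Spec_step_d_t; infer_instance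

-- ===== CLAIM (what is proved, stated in full; the proofs are below) =====
def Claim_equal_step_d_t : Prop :=
  ∀ (n : Int) (k : Int), Dom_step_d_t n k → Pre_step_d_t n k → Spec_step_d_t n k (step_d_t n k)

-- ===== LEMMAS AND PROOFS =====

-- list-level reading of A's inner loop, used as the common reference of both ports
def innerA (k i : Int) (dp : List Int) : Int :=
  (PySem.List.pyRange 1 (k+1) 1).foldl
    (fun ans j => if i - j ≥ 0 then ans + PySem.List.pyGetD dp (i-j) 0 else ans) 0

-- dp table built step by step: pvBuild k i = A's dp prefix of length i+1
def pvBuild (k : Int) : Nat → List Int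
  | 0 => [1]
  | i+1 => pvBuild k i ++ [innerA k ((i : Int)+1) (pvBuild k i)]

lemma pvBuild_length (k : Int) (i : Nat) : (pvBuild k i).length = i + 1 := by
  induction i with
  | zero => rfl
  | succ i ih => simp [pvBuild, ih]

lemma arr_getD_toList (a : Array Int) (n : Nat) (d : Int) : a.getD n d = a.toList.getD n d := by
  rcases Nat.lt_or_ge n a.size with h|h
  · simp [Array.getD, h, List.getD_eq_getElem?_getD]
  · simp [Array.getD, Nat.not_lt.2 h, List.getD_eq_getElem?_getD]

lemma arr_getD_int (a : Array Int) (i : Int) (d : Int) (h : 0 ≤ i) :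
    a.getD i.toNat d = PySem.List.pyGetD a.toList i d := by
  rw [arr_getD_toList, show i = ((i.toNat : Nat) : Int) from (Int.toNat_of_nonneg h).symm,
      PySem.List.pyGetD_natCast]
  have hmax : (max i 0).toNat = i.toNat := by omega
  simp [hmax]

lemma pySetD_int (xs : List Int) (i : Int) (v : Int) (h : 0 ≤ i) :
    PySem.List.pySetD xs i v = xs.set i.toNat v := by
  rw [show i = ((i.toNat : Nat) : Int) from (Int.toNat_of_nonneg h).symm,
      PySem.List.pySetD_natCast]
  have hmax : (max i 0).toNat = i.toNat := by omega
  simp [hmax]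

lemma innerAA_toList (k i : Int) (dp : Array Int) : innerAA k i dp = innerA k i dp.toList := by
  unfold innerAA innerA
  apply PySem.List.foldl_congr_mem
  intro acc j _
  by_cases hg : i - j ≥ 0
  · rw [if_pos hg, if_pos hg, arr_getD_int _ _ _ hg]
  · rw [if_neg hg, if_neg hg]

lemma innerA_zero (k : Int) (dp : List Int) : innerA k 0 dp = 0 := by
  unfold innerA
  rw [PySem.List.foldl_congr_mem (g := fun acc _ => acc)]
  · simp
  · intro acc x hx
    have hx1 : 1 ≤ x := (PySem.List.mem_pyRange_one.mp hx).1
    rw [if_neg (by omega)]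

lemma innerA_nonpos (k : Int) (hk : k ≤ 0) (i : Int) (dp : List Int) :
    innerA k i dp = 0 := by
  unfold innerA
  rw [PySem.List.pyRange_one_eq_nil (by omega)]
  rfl

lemma innerA_succ_k (κ : Nat) (i : Int) (dp : List Int) :
    innerA ((κ : Int)+1) i dp =
      innerA (κ : Int) i dp +
        (if i - ((κ : Int)+1) ≥ 0 then PySem.List.pyGetD dp (i - ((κ : Int)+1)) 0 else 0) := by
  unfold innerA
  have h : PySem.List.pyRange 1 (((κ : Int)+1)+1) 1
      = PySem.List.pyRange 1 ((κ : Int)+1) 1 ++ [(κ : Int)+1] := by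
    exact PySem.List.pyRange_one_succ_right (by omega)
  rw [h, List.foldl_append]
  simp only [List.foldl_cons, List.foldl_nil]
  split_ifs with h1 <;> ring

lemma innerA_slide (κ : Nat) (i : Nat) (dp : List Int) :
    innerA (κ : Int) ((i : Int)+1) dp =
      innerA (κ : Int) (i : Int) dp + PySem.List.pyGetD dp (i : Int) 0 -
        (if (i : Int) - κ ≥ 0 then PySem.List.pyGetD dp ((i : Int) - κ) 0 else 0) := by
  induction κ with
  | zero =>
    have h0 : ∀ j : Int, innerA 0 j dp = 0 := fun j => innerA_nonpos 0 le_rfl j dp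
    simp [h0]
  | succ κ ih =>
    have e1 : ((κ+1 : Nat) : Int) = (κ : Int) + 1 := by push_cast; ring
    rw [e1, innerA_succ_k κ ((i : Int)+1) dp, innerA_succ_k κ (i : Int) dp, ih]
    have e2 : (i : Int) + 1 - ((κ : Int)+1) = (i : Int) - κ := by ring
    rw [e2]
    split_ifs <;> ring

lemma pvSet_append_length {α : Type} (xs ys : List α) (y v : α) :
    (xs ++ y :: ys).set xs.length v = xs ++ v :: ys := by
  induction xs with
  | nil => rfl
  | cons a xs ih => simp [ih]

lemma innerA_append (k i : Int) (dp rest : List Int) (h : i ≤ (dp.length : Int)) :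
    innerA k i (dp ++ rest) = innerA k i dp := by
  unfold innerA
  apply PySem.List.foldl_congr_mem
  intro acc j hj
  have hj1 : 1 ≤ j := (PySem.List.mem_pyRange_one.mp hj).1
  by_cases hg : i - j ≥ 0
  · have hn : (i - j).toNat < dp.length := by omega
    have hc : i - j = (((i - j).toNat : Nat) : Int) := (Int.toNat_of_nonneg hg).symm
    rw [if_pos hg, if_pos hg, hc, PySem.List.pyGetD_natCast, PySem.List.pyGetD_natCast]
    rw [List.getD_eq_getElem?_getD, List.getD_eq_getElem?_getD, List.getElem?_append_left hn]
  · rw [if_neg hg, if_neg hg]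

-- B's loop step at loop value i+1, from state (pvBuild k i, innerA k i (pvBuild k i))
lemma B_step (k : Int) (i : Nat) :
    (fun (st : List Int × Int) i => (st.1 ++ [(if k > 0 then (if i - k - 1 ≥ 0 then st.2 + PySem.List.pyGetD st.1 (i-1) 0 - PySem.List.pyGetD st.1 (i-k-1) 0 else st.2 + PySem.List.pyGetD st.1 (i-1) 0) else st.2)], (if k > 0 then (if i - k - 1 ≥ 0 then st.2 + PySem.List.pyGetD st.1 (i-1) 0 - PySem.List.pyGetD st.1 (i-k-1) 0 else st.2 + PySem.List.pyGetD st.1 (i-1) 0) else st.2)))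
      (pvBuild k i, innerA k (i : Int) (pvBuild k i)) ((i : Int)+1)
    = (pvBuild k (i+1), innerA k ((i : Int)+1) (pvBuild k (i+1))) := by
  have hlen : ((pvBuild k i).length : Int) = (i : Int) + 1 := by
    rw [pvBuild_length]; push_cast; ring
  have happ : innerA k ((i : Int)+1) (pvBuild k (i+1)) = innerA k ((i : Int)+1) (pvBuild k i) := by
    show innerA k ((i : Int)+1) (pvBuild k i ++ _) = _
    exact innerA_append _ _ _ _ (by omega)
  have hb : pvBuild k (i+1) = pvBuild k i ++ [innerA k ((i : Int)+1) (pvBuild k i)] := by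
    simp [pvBuild]
  have hval : (if k > 0 then
        (if ((i : Int)+1) - k - 1 ≥ 0 then
          innerA k (i : Int) (pvBuild k i) + PySem.List.pyGetD (pvBuild k i) (((i : Int)+1)-1) 0
            - PySem.List.pyGetD (pvBuild k i) (((i : Int)+1)-k-1) 0
        else innerA k (i : Int) (pvBuild k i) + PySem.List.pyGetD (pvBuild k i) (((i : Int)+1)-1) 0)
      else innerA k (i : Int) (pvBuild k i))
      = innerA k ((i : Int)+1) (pvBuild k i) := by
    by_cases hk : k > 0
    · have hκ : ((k.toNat : Int)) = k := Int.toNat_of_nonneg (by omega)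
      have hs := innerA_slide k.toNat i (pvBuild k i)
      rw [hκ] at hs
      have e1 : ((i : Int)+1) - 1 = (i : Int) := by ring
      have e2 : ((i : Int)+1) - k - 1 = (i : Int) - k := by ring
      rw [if_pos hk, e1, e2, hs]
      split_ifs <;> ring
    · rw [if_neg hk, innerA_nonpos k (by omega), innerA_nonpos k (by omega)]
  dsimp only
  rw [hval, happ, hb]

lemma B_inv (k : Int) (i : Nat) :
    (PySem.List.pyRange 1 ((i : Int)+1) 1).foldl
      (fun (st : List Int × Int) i => (st.1 ++ [(if k > 0 then (if i - k - 1 ≥ 0 then st.2 + PySem.List.pyGetD st.1 (i-1) 0 - PySem.List.pyGetD st.1 (i-k-1) 0 else st.2 + PySem.List.pyGetD st.1 (i-1) 0) else st.2)], (if k > 0 then (if i - k - 1 ≥ 0 then st.2 + PySem.List.pyGetD st.1 (i-1) 0 - PySem.List.pyGetD st.1 (i-k-1) 0 else st.2 + PySem.List.pyGetD st.1 (i-1) 0) else st.2))) ([1], 0)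
    = (pvBuild k i, innerA k (i : Int) (pvBuild k i)) := by
  induction i with
  | zero =>
    rw [PySem.List.pyRange_one_eq_nil (by omega)]
    simp [pvBuild, innerA_zero]
  | succ i ih =>
    have h : PySem.List.pyRange 1 (((i+1 : Nat) : Int)+1) 1
        = PySem.List.pyRange 1 ((i : Int)+1) 1 ++ [(i : Int)+1] := by
      have e : (((i+1 : Nat) : Int)+1) = ((i : Int)+1) + 1 := by push_cast; ring
      rw [e]; exact PySem.List.pyRange_one_succ_right (by omega)
    rw [h, List.foldl_append, ih, List.foldl_cons, List.foldl_nil]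
    have hstep := B_step k i
    dsimp only at hstep ⊢
    rw [hstep]
    have e : ((i : Int)+1) = ((i+1 : Nat) : Int) := by push_cast; ring
    rw [e]

lemma B_fold_toList (k : Int) (l : List Int) (st : Array Int × Int) (hl : ∀ i ∈ l, 1 ≤ i) :
    ((l.foldl (fun (st : Array Int × Int) i => (st.1.push (if k > 0 then (if i - k - 1 ≥ 0 then st.2 + st.1.getD (i-1).toNat 0 - st.1.getD (i-k-1).toNat 0 else st.2 + st.1.getD (i-1).toNat 0) else st.2), (if k > 0 then (if i - k - 1 ≥ 0 then st.2 + st.1.getD (i-1).toNat 0 - st.1.getD (i-k-1).toNat 0 else st.2 + st.1.getD (i-1).toNat 0) else st.2))) st).1.toList, (l.foldl (fun (st : Array Int × Int) i => (st.1.push (if k > 0 then (if i - k - 1 ≥ 0 then st.2 + st.1.getD (i-1).toNat 0 - st.1.getD (i-k-1).toNat 0 else st.2 + st.1.getD (i-1).toNat 0) else st.2), (if k > 0 then (if i - k - 1 ≥ 0 then st.2 + st.1.getD (i-1).toNat 0 - st.1.getD (i-k-1).toNat 0 else st.2 + st.1.getD (i-1).toNat 0) else st.2))) st).2)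
    = l.foldl (fun (st : List Int × Int) i => (st.1 ++ [(if k > 0 then (if i - k - 1 ≥ 0 then st.2 + PySem.List.pyGetD st.1 (i-1) 0 - PySem.List.pyGetD st.1 (i-k-1) 0 else st.2 + PySem.List.pyGetD st.1 (i-1) 0) else st.2)], (if k > 0 then (if i - k - 1 ≥ 0 then st.2 + PySem.List.pyGetD st.1 (i-1) 0 - PySem.List.pyGetD st.1 (i-k-1) 0 else st.2 + PySem.List.pyGetD st.1 (i-1) 0) else st.2))) (st.1.toList, st.2) := by
  induction l generalizing st with
  | nil => rfl
  | cons a l ihl =>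
    have ha : (1:Int) ≤ a := hl a List.mem_cons_self
    rw [List.foldl_cons, List.foldl_cons, ihl _ (fun i hi => hl i (List.mem_cons_of_mem a hi))]
    congr 1
    have hw : (if k > 0 then
          (if a - k - 1 ≥ 0 then
            st.2 + st.1.getD (a-1).toNat 0 - st.1.getD (a-k-1).toNat 0
          else st.2 + st.1.getD (a-1).toNat 0)
        else st.2)
        = (if k > 0 then
          (if a - k - 1 ≥ 0 then
            st.2 + PySem.List.pyGetD st.1.toList (a-1) 0 - PySem.List.pyGetD st.1.toList (a-k-1) 0
          else st.2 + PySem.List.pyGetD st.1.toList (a-1) 0)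
        else st.2) := by
      by_cases hk : k > 0
      · by_cases hg : a - k - 1 ≥ 0
        · rw [if_pos hk, if_pos hk, if_pos hg, if_pos hg,
              arr_getD_int _ _ _ (by omega), arr_getD_int _ _ _ hg]
        · rw [if_pos hk, if_pos hk, if_neg hg, if_neg hg, arr_getD_int _ _ _ (by omega)]
      · rw [if_neg hk, if_neg hk]
    dsimp only
    rw [Array.toList_push, hw]

lemma A_fold_toList (k : Int) (l : List Int) (arr : Array Int) (hl : ∀ i ∈ l, 1 ≤ i) :
    (l.foldl (fun dp i => dp.setIfInBounds i.toNat (innerAA k i dp)) arr).toList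
    = l.foldl (fun dp i => PySem.List.pySetD dp i (innerA k i dp)) arr.toList := by
  induction l generalizing arr with
  | nil => rfl
  | cons a l ih =>
    have ha : (1:Int) ≤ a := hl a List.mem_cons_self
    rw [List.foldl_cons, List.foldl_cons, ih _ (fun i hi => hl i (List.mem_cons_of_mem a hi))]
    congr 1
    rw [Array.toList_setIfInBounds, innerAA_toList, pySetD_int _ _ _ (by omega)]

lemma A_inv (k : Int) (m i : Nat) (h : i ≤ m) :
    (PySem.List.pyRange 1 ((i : Int)+1) 1).foldl
      (fun dp v => PySem.List.pySetD dp v (innerA k v dp))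
      ((1 : Int) :: List.replicate m 0)
    = pvBuild k i ++ List.replicate (m - i) 0 := by
  induction i with
  | zero =>
    rw [PySem.List.pyRange_one_eq_nil (by omega)]
    simp [pvBuild]
  | succ i ih =>
    have hi : i ≤ m := by omega
    have hlt : i < m := by omega
    have hr : PySem.List.pyRange 1 (((i+1 : Nat) : Int)+1) 1
        = PySem.List.pyRange 1 ((i : Int)+1) 1 ++ [(i : Int)+1] := by
      have e : (((i+1 : Nat) : Int)+1) = ((i : Int)+1) + 1 := by push_cast; ring
      rw [e]; exact PySem.List.pyRange_one_succ_right (by omega)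
    rw [hr, List.foldl_append, ih hi]
    simp only [List.foldl_cons, List.foldl_nil]
    have hlen : ((pvBuild k i).length : Int) = (i : Int) + 1 := by
      rw [pvBuild_length]; push_cast; ring
    have hinner : innerA k ((i : Int)+1) (pvBuild k i ++ List.replicate (m - i) 0)
        = innerA k ((i : Int)+1) (pvBuild k i) :=
      innerA_append _ _ _ _ (by omega)
    have hrep : List.replicate (m - i) (0 : Int) = 0 :: List.replicate (m - (i+1)) 0 := by
      have : m - i = (m - (i+1)) + 1 := by omega
      rw [this, List.replicate_succ]
    have htn : ((i : Int)+1).toNat = (pvBuild k i).length := by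
      rw [pvBuild_length]; omega
    have hb : pvBuild k (i+1) = pvBuild k i ++ [innerA k ((i : Int)+1) (pvBuild k i)] := by
      simp [pvBuild]
    rw [hinner, pySetD_int _ _ _ (by omega), hrep, htn, pvSet_append_length, hb]
    simp

-- ===== VERDICT (by name: the statement is the Claim_ definition above) =====
theorem step_d_t_spec : Claim_equal_step_d_t := by
  intro n k _ hpre
  unfold Spec_step_d_t
  obtain ⟨m, rfl⟩ : ∃ m : Nat, n = (m : Int) := ⟨n.toNat, (Int.toNat_of_nonneg hpre).symm⟩
  have hmem : ∀ i ∈ PySem.List.pyRange 1 ((m : Int)+1) 1, (1:Int) ≤ i :=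
    fun i hi => (PySem.List.mem_pyRange_one.mp hi).1
  have hinitA : ((Array.replicate ((m : Int)+1).toNat 0).setIfInBounds 0 1).toList
      = (1 : Int) :: List.replicate m 0 := by
    have h1 : ((m : Int)+1).toNat = m + 1 := by omega
    rw [Array.toList_setIfInBounds]
    simp [h1, List.replicate_succ]
  have hfst : ((PySem.List.pyRange 1 ((m : Int)+1) 1).foldl (fun (st : Array Int × Int) i => (st.1.push (if k > 0 then (if i - k - 1 ≥ 0 then st.2 + st.1.getD (i-1).toNat 0 - st.1.getD (i-k-1).toNat 0 else st.2 + st.1.getD (i-1).toNat 0) else st.2), (if k > 0 then (if i - k - 1 ≥ 0 then st.2 + st.1.getD (i-1).toNat 0 - st.1.getD (i-k-1).toNat 0 else st.2 + st.1.getD (i-1).toNat 0) else st.2))) (#[1], 0)).1.toList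
      = ((PySem.List.pyRange 1 ((m : Int)+1) 1).foldl (fun (st : List Int × Int) i => (st.1 ++ [(if k > 0 then (if i - k - 1 ≥ 0 then st.2 + PySem.List.pyGetD st.1 (i-1) 0 - PySem.List.pyGetD st.1 (i-k-1) 0 else st.2 + PySem.List.pyGetD st.1 (i-1) 0) else st.2)], (if k > 0 then (if i - k - 1 ≥ 0 then st.2 + PySem.List.pyGetD st.1 (i-1) 0 - PySem.List.pyGetD st.1 (i-k-1) 0 else st.2 + PySem.List.pyGetD st.1 (i-1) 0) else st.2))) (([1] : List Int), (0 : Int))).1 :=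
    congrArg Prod.fst (B_fold_toList k (PySem.List.pyRange 1 ((m : Int)+1) 1) (#[1], 0) hmem)
  simp only [step_d_t, step_d_t_alt]
  rw [A_fold_toList k _ _ hmem, hinitA, A_inv k m m le_rfl, hfst, B_inv k m]
  simp
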